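-- pv_equiv track=rewrite | github.com/varunisrani/thinkaiback | scheduling/agents/assistant_director_agent.py | _is_travel_day
-- ===== SOURCE A (Python) =====
-- from typing import Dict, Any, List
--
-- def _is_travel_day(day_number: int, work_days: List[int]) -> bool:
--     """Determine if a day is a travel day."""
--     work_days_sorted = sorted(work_days)
--
--     for i in range(1, len(work_days_sorted)):
--         gap_start = work_days_sorted[i-1] + 1
--         gap_end = work_days_sorted[i] - 1
--
--         if gap_start <= day_number <= gap_end:
--             # First and last days of gaps are typically travel days
--             return day_number == gap_start or day_number == gap_end
--
--     return False
-- ===== SOURCE B (Python) =====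
-- def _is_travel_day(day_number, work_days):
--     """Single pass, no sort: day is a travel day iff it is not a work day and
--     it is adjacent to a work day while some work day lies on the other side."""
--     below = above = adj_lo = adj_hi = False
--     for w in work_days:
--         if w == day_number:
--             return False
--         if w < day_number:
--             below = True
--             if w == day_number - 1:
--                 adj_lo = True
--         else:
--             above = True
--             if w == day_number + 1:
--                 adj_hi = True
--     return (adj_lo and above) or (adj_hi and below)
-- ===== Notes on version B (the rewrite author's own statement) =====
-- stated objective: faster
-- what changed: Replaced sort-then-scan-adjacent-pairs with a single unsorted pass that tracks whether a work day exists below/above day_number and whether day_number-1 or day_number+1 is a work day.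
import Mathlib
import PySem

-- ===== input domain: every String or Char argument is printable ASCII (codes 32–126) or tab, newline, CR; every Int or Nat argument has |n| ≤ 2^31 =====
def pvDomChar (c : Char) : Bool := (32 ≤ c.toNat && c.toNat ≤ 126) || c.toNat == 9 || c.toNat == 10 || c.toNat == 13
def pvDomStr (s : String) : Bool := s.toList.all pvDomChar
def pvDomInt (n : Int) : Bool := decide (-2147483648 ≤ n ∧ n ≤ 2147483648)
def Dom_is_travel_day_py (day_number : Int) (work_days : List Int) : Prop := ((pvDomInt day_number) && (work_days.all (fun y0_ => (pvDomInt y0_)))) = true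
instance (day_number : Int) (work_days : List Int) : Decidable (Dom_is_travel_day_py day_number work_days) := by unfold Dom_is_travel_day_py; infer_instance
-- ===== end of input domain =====

-- B replaces A's sort + scan of adjacent sorted pairs by a single unsorted pass (faster: O(n) vs O(n log n)).

-- ===== PORT A =====
-- A's loop over i in range(1, len(sorted)) reads the adjacent pair (sorted[i-1], sorted[i]);
-- ported as the structurally identical recursion over adjacent pairs of the sorted list,
-- with the early 'return' as the if-branch result.
def aGapLoop (day : Int) : List Int → Bool
  | a :: b :: rest =>
      if a + 1 ≤ day ∧ day ≤ b - 1 then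
        decide (day = a + 1 ∨ day = b - 1)
      else aGapLoop day (b :: rest)
  | _ => false

def is_travel_day_py (day_number : Int) (work_days : List Int) : Bool :=
  aGapLoop day_number (PySem.List.sorted work_days (fun x => x) false)

-- ===== PORT B =====
-- B's single for-loop with four boolean flags and an early return on w == day_number.
def bLoop (day : Int) : List Int → Bool → Bool → Bool → Bool → Bool
  | [], below, above, adjLo, adjHi => (adjLo && above) || (adjHi && below)
  | w :: rest, below, above, adjLo, adjHi =>
      if w = day then false
      else if w < day then
        bLoop day rest true above (adjLo || decide (w = day - 1)) adjHi
      else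
        bLoop day rest below true adjLo (adjHi || decide (w = day + 1))

def is_travel_day_py_alt (day_number : Int) (work_days : List Int) : Bool :=
  bLoop day_number work_days false false false false

-- ===== PRECONDITION & SPEC =====
def Spec_is_travel_day_py (day_number : Int) (work_days : List Int) (out : Bool) : Prop := out = is_travel_day_py_alt day_number work_days
instance (day_number : Int) (work_days : List Int) (out : Bool) : Decidable (Spec_is_travel_day_py day_number work_days out) := by unfold Spec_is_travel_day_py; infer_instance

-- ===== CLAIM (what is proved, stated in full; the proofs are below) =====
def Claim_equal_is_travel_day_py : Prop := ∀ (day_number : Int) (work_days : List Int), Dom_is_travel_day_py day_number work_days → Spec_is_travel_day_py day_number work_days (is_travel_day_py day_number work_days)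

-- ===== LEMMAS AND PROOFS =====

-- Both programs decide this membership-only property, which is permutation-invariant.
def PTravel (day : Int) (xs : List Int) : Prop :=
  day ∉ xs ∧ (((day - 1) ∈ xs ∧ ∃ x ∈ xs, day < x) ∨ ((day + 1) ∈ xs ∧ ∃ x ∈ xs, x < day))

theorem bLoop_iff (day : Int) : ∀ (xs : List Int) (below above adjLo adjHi : Bool),
    bLoop day xs below above adjLo adjHi = true ↔
      day ∉ xs ∧
        (((adjLo = true ∨ (day - 1) ∈ xs) ∧ (above = true ∨ ∃ x ∈ xs, day < x)) ∨
         ((adjHi = true ∨ (day + 1) ∈ xs) ∧ (below = true ∨ ∃ x ∈ xs, x < day))) := by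
  intro xs
  induction xs with
  | nil =>
      intro below above adjLo adjHi
      simp [bLoop]
  | cons w rest ih =>
      intro below above adjLo adjHi
      by_cases hw : w = day
      · simp [bLoop, hw]
      · have hne : ¬ day = w := fun h => hw h.symm
        by_cases hlt : w < day
        · have h1 : ¬ day < w := by omega
          have h2 : ¬ day + 1 = w := by omega
          have h4 : (day - 1 = w) = (w = day - 1) := propext eq_comm
          simp only [bLoop, if_neg hw, if_pos hlt]
          rw [ih]
          simp [List.mem_cons, hlt, hne, h1, h2, h4, or_assoc]
        · have hgt : day < w := by omega
          have h1 : ¬ w < day := hlt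
          have h2 : ¬ day - 1 = w := by omega
          have h4 : (day + 1 = w) = (w = day + 1) := propext eq_comm
          simp only [bLoop, if_neg hw, if_neg hlt]
          rw [ih]
          simp [List.mem_cons, hgt, hne, h1, h2, h4, or_assoc]

theorem aGapLoop_iff (day : Int) : ∀ (s : List Int), s.Pairwise (· ≤ ·) →
    (aGapLoop day s = true ↔ PTravel day s) := by
  intro s
  induction s with
  | nil =>
      intro _
      simp [aGapLoop, PTravel]
  | cons a t ih =>
      intro hp
      cases t with
      | nil =>
          simp only [aGapLoop, PTravel, List.mem_singleton]
          constructor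
          · intro h; cases h
          · rintro ⟨-, ⟨h1, x, hx, hdx⟩ | ⟨h1, x, hx, hdx⟩⟩ <;> simp_all <;> omega
      | cons b rest =>
          have hab : a ≤ b := (List.pairwise_cons.mp hp).1 b (List.mem_cons_self ..)
          have har : ∀ x ∈ b :: rest, a ≤ x := (List.pairwise_cons.mp hp).1
          have hpt : (b :: rest).Pairwise (· ≤ ·) := (List.pairwise_cons.mp hp).2
          have hbr : ∀ x ∈ rest, b ≤ x := (List.pairwise_cons.mp hpt).1
          by_cases hin : a + 1 ≤ day ∧ day ≤ b - 1
          · -- day lies strictly between a and b: every later element is ≥ b > day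
            have ha' : a < day := by omega
            have hb' : day < b := by omega
            simp only [aGapLoop, if_pos hin, decide_eq_true_eq, PTravel, List.mem_cons]
            constructor
            · rintro (h | h)
              · refine ⟨?_, Or.inl ⟨Or.inl (by omega), ⟨b, Or.inr (Or.inl rfl), hb'⟩⟩⟩
                rintro (h1 | h1 | h1)
                · omega
                · omega
                · have := hbr day h1; omega
              · refine ⟨?_, Or.inr ⟨Or.inr (Or.inl (by omega)), ⟨a, Or.inl rfl, ha'⟩⟩⟩
                rintro (h1 | h1 | h1)
                · omega
                · omega
                · have := hbr day h1; omega
            · rintro ⟨hnm, ⟨h1, -⟩ | ⟨h1, -⟩⟩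
              · left
                rcases h1 with h1 | h1 | h1
                · omega
                · omega
                · have := hbr (day - 1) h1; omega
              · right
                rcases h1 with h1 | h1 | h1
                · omega
                · omega
                · have := hbr (day + 1) h1; omega
          · -- day is not strictly inside the gap (a, b): dropping a preserves PTravel
            simp only [aGapLoop, if_neg hin]
            rw [ih hpt]
            have key : PTravel day (b :: rest) ↔ PTravel day (a :: b :: rest) := by
              by_cases hda : day ≤ a
              · -- all elements are ≥ a ≥ day: both sides false
                constructor
                · rintro ⟨-, ⟨h1, -⟩ | ⟨-, x, hx, hdx⟩⟩
                  · have := har (day - 1) h1; omega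
                  · have := har x hx; omega
                · rintro ⟨-, ⟨h1, -⟩ | ⟨-, x, hx, hdx⟩⟩
                  · rcases List.mem_cons.mp h1 with h1 | h1
                    · omega
                    · have := har (day - 1) h1; omega
                  · rcases List.mem_cons.mp hx with rfl | hx
                    · omega
                    · have := har x hx; omega
              · -- a < day, hence b ≤ day
                have ha' : a < day := by omega
                have hb' : b ≤ day := by omega
                by_cases hd : day ∈ (b :: rest)
                · constructor
                  · rintro ⟨hnm, -⟩; exact absurd hd hnm
                  · rintro ⟨hnm, -⟩; exact absurd (List.mem_cons.mpr (Or.inr hd)) hnm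
                · have hbd : b < day := by
                    rcases lt_or_eq_of_le hb' with h | h
                    · exact h
                    · exact absurd (h ▸ List.mem_cons_self ..) hd
                  unfold PTravel
                  simp only [List.mem_cons]
                  constructor
                  · rintro ⟨hnm, hdisj⟩
                    refine ⟨by rintro (h | h) <;> [omega; exact hnm h], ?_⟩
                    rcases hdisj with ⟨h1, x, hx, hdx⟩ | ⟨h1, -⟩
                    · exact Or.inl ⟨Or.inr h1, ⟨x, Or.inr hx, hdx⟩⟩
                    · exact Or.inr ⟨Or.inr h1, ⟨b, Or.inr (Or.inl rfl), hbd⟩⟩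
                  · rintro ⟨hnm, hdisj⟩
                    refine ⟨fun h => hnm (Or.inr h), ?_⟩
                    rcases hdisj with ⟨h1, x, hx, hdx⟩ | ⟨h1, -⟩
                    · refine Or.inl ⟨?_, ?_⟩
                      · rcases h1 with h1 | h1
                        · -- day - 1 = a, but a ≤ b < day forces b = day - 1
                          have : b = day - 1 := by omega
                          exact Or.inl this.symm
                        · exact h1
                      · rcases hx with rfl | hx
                        · omega
                        · exact ⟨x, hx, hdx⟩
                    · refine Or.inr ⟨?_, ⟨b, Or.inl rfl, hbd⟩⟩
                      rcases h1 with h1 | h1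
                      · omega
                      · exact h1
            exact key

theorem PTravel_perm (day : Int) {xs ys : List Int} (h : xs.Perm ys) :
    PTravel day xs ↔ PTravel day ys := by
  unfold PTravel
  constructor
  · rintro ⟨hnm, hdisj⟩
    refine ⟨fun hm => hnm (h.mem_iff.mpr hm), ?_⟩
    rcases hdisj with ⟨h1, x, hx, hdx⟩ | ⟨h1, x, hx, hdx⟩
    · exact Or.inl ⟨h.mem_iff.mp h1, ⟨x, h.mem_iff.mp hx, hdx⟩⟩
    · exact Or.inr ⟨h.mem_iff.mp h1, ⟨x, h.mem_iff.mp hx, hdx⟩⟩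
  · rintro ⟨hnm, hdisj⟩
    refine ⟨fun hm => hnm (h.mem_iff.mp hm), ?_⟩
    rcases hdisj with ⟨h1, x, hx, hdx⟩ | ⟨h1, x, hx, hdx⟩
    · exact Or.inl ⟨h.mem_iff.mpr h1, ⟨x, h.mem_iff.mpr hx, hdx⟩⟩
    · exact Or.inr ⟨h.mem_iff.mpr h1, ⟨x, h.mem_iff.mpr hx, hdx⟩⟩

-- ===== VERDICT (by name: the statement is the Claim_ definition above) =====
theorem is_travel_day_py_spec : Claim_equal_is_travel_day_py := by
  intro day ws _
  unfold Spec_is_travel_day_py is_travel_day_py is_travel_day_py_alt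
  have hpair : (PySem.List.sorted ws (fun x => x) false).Pairwise (· ≤ ·) :=
    PySem.List.sorted_pairwise ws (fun x => x)
  have hperm : (PySem.List.sorted ws (fun x => x) false).Perm ws :=
    PySem.List.sorted_perm ws (fun x => x) false
  have hA := aGapLoop_iff day (PySem.List.sorted ws (fun x => x) false) hpair
  have hB := bLoop_iff day ws false false false false
  have hB' : bLoop day ws false false false false = true ↔ PTravel day ws := by
    rw [hB]
    unfold PTravel
    constructor
    · rintro ⟨hnm, ⟨h1, h2⟩ | ⟨h1, h2⟩⟩
      · exact ⟨hnm, Or.inl ⟨by tauto, by tauto⟩⟩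
      · exact ⟨hnm, Or.inr ⟨by tauto, by tauto⟩⟩
    · rintro ⟨hnm, ⟨h1, h2⟩ | ⟨h1, h2⟩⟩
      · exact ⟨hnm, Or.inl ⟨Or.inr h1, Or.inr h2⟩⟩
      · exact ⟨hnm, Or.inr ⟨Or.inr h1, Or.inr h2⟩⟩
  have hiff : aGapLoop day (PySem.List.sorted ws (fun x => x) false) = true ↔
      bLoop day ws false false false false = true := by
    rw [hA, hB', PTravel_perm day hperm]
  cases hx : aGapLoop day (PySem.List.sorted ws (fun x => x) false) <;>
    cases hy : bLoop day ws false false false false <;> simp_all
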